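-- pv_equiv track=rewrite | github.com/Cory-Avrutis/Free-Quizlet | quizFunc.py | validQuiz
-- ===== SOURCE A (Python) =====
-- def validQuiz(cards):
--     if len(cards) < 2:
--         return False
--     # needs at least two different definitions to make a quiz
--     values = list(cards.values())
--     for term in cards:
--         if values[0] != cards[term]:
--             return True
--     return False
-- ===== SOURCE B (Python) =====
-- def validQuiz(cards):
--     if len(cards) < 2:
--         return False
--     return len(set(cards.values())) > 1
-- ===== Notes on version B (the rewrite author's own statement) =====
-- stated objective: simpler
-- what changed: Replaces the explicit scan comparing every definition against the first (with per-key dict lookups and an early return) by building the set of definition values once and testing whether it has more than one distinct element.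
import Mathlib
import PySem

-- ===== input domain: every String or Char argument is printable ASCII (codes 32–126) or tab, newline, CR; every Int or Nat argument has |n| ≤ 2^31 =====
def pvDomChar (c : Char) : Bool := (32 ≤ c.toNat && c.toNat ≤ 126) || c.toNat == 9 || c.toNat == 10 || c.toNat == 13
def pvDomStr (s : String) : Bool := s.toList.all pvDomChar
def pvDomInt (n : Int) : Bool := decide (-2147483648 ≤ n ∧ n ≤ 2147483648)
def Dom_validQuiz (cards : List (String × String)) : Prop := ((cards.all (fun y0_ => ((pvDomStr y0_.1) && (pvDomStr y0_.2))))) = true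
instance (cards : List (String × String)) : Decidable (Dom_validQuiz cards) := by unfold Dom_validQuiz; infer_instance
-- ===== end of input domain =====

-- B replaces A's scan comparing each definition against the first by one distinct-values set test (objective: simpler).

-- ===== PORT A =====
def validQuiz (cards : List (String × String)) : Bool :=
  if cards.length < 2 then false
  else
    let values := cards.map Prod.snd
    -- values[0]: the default "" is unreachable here since len(cards) ≥ 2
    let v0 := (PySem.List.pyGet? values 0).getD ""
    -- for term in cards: if values[0] != cards[term]: return True  — early-exit scan over the keys;
    -- cards[term] is first-match lookup (the default "" is unreachable: term is a key of cards)
    (cards.map Prod.fst).any (fun term => v0 != (cards.lookup term).getD "")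

-- ===== PORT B =====
def validQuiz_alt (cards : List (String × String)) : Bool :=
  if cards.length < 2 then false
  else decide ((PySem.Set.ofList (cards.map Prod.snd)).length > 1)

-- ===== PRECONDITION & SPEC =====
-- cards models a Python dict, whose keys are necessarily unique; association lists with
-- duplicate keys do not correspond to any Python input, so they are excluded.
def Pre_validQuiz (cards : List (String × String)) : Prop := (cards.map Prod.fst).Nodup
instance (cards : List (String × String)) : Decidable (Pre_validQuiz cards) := by unfold Pre_validQuiz; infer_instance
def pvWitness_validQuiz : (List (String × String)) := [("a", "x"), ("b", "y")]
def Spec_validQuiz (cards : List (String × String)) (out : Bool) : Prop := out = validQuiz_alt cards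
instance (cards : List (String × String)) (out : Bool) : Decidable (Spec_validQuiz cards out) := by unfold Spec_validQuiz; infer_instance

-- ===== CLAIM (what is proved, stated in full; the proofs are below) =====
def Claim_equal_validQuiz : Prop := ∀ (cards : List (String × String)), Dom_validQuiz cards → Pre_validQuiz cards → Spec_validQuiz cards (validQuiz cards)

-- ===== LEMMAS AND PROOFS =====

theorem pvAnyCongr {α : Type} (l : List α) (p q : α → Bool) (h : ∀ x ∈ l, p x = q x) :
    l.any p = l.any q := by
  induction l with
  | nil => rfl
  | cons x xs ih =>
    simp only [List.any_cons, h x (List.mem_cons_self)]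
    rw [ih (fun y hy => h y (List.mem_cons_of_mem _ hy))]

-- with unique keys, looking each key back up yields exactly the paired value
theorem lookup_scan_eq_snd_scan (cards : List (String × String))
    (h : (cards.map Prod.fst).Nodup) (v0 : String) :
    (cards.map Prod.fst).any (fun term => v0 != (cards.lookup term).getD "")
      = cards.any (fun p => v0 != p.2) := by
  induction cards with
  | nil => rfl
  | cons hd tl ih =>
    obtain ⟨k1, b1⟩ := hd
    simp only [List.map_cons, List.nodup_cons] at h
    simp only [List.map_cons, List.any_cons]
    have h0 : List.lookup k1 ((k1, b1) :: tl) = some b1 := by simp [List.lookup]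
    rw [h0]
    congr 1
    rw [← ih h.2]
    have hcong : ∀ t ∈ List.map Prod.fst tl,
        (v0 != (List.lookup t ((k1, b1) :: tl)).getD "") = (v0 != (List.lookup t tl).getD "") := by
      intro t ht
      have hne : (t == k1) = false := by
        simp only [beq_eq_false_iff_ne]
        intro he; exact h.1 (he ▸ ht)
      simp [List.lookup, hne]
    exact pvAnyCongr _ _ _ hcong

theorem ofList_eq_singleton_of_all_eq (a : String) (l : List String)
    (h : ∀ v ∈ l, v = a) : PySem.Set.ofList (a :: l) = [a] := by
  have : ∀ (l : List String), (∀ v ∈ l, v = a) → l.foldl PySem.Set.add [a] = [a] := by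
    intro l
    induction l with
    | nil => intro _; rfl
    | cons x xs ih =>
      intro hx
      have hxa : x = a := hx x (List.mem_cons_self)
      subst hxa
      have : PySem.Set.add [x] x = [x] := by simp [PySem.Set.add, PySem.Set.contains]
      simpa [List.foldl_cons, this] using ih (fun v hv => hx v (List.mem_cons_of_mem _ hv))
  have h0 : PySem.Set.ofList (a :: l) = l.foldl PySem.Set.add [a] := by
    simp [PySem.Set.ofList_eq_foldl, List.foldl_cons, PySem.Set.add]
  rw [h0]; exact this l h

theorem set_card_gt_one_iff (a : String) (l : List String) :
    decide ((PySem.Set.ofList (a :: l)).length > 1) = l.any (fun v => a != v) := by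
  by_cases hall : ∀ v ∈ l, v = a
  · have h1 : (PySem.Set.ofList (a :: l)) = [a] := ofList_eq_singleton_of_all_eq a l hall
    have h2 : l.any (fun v => a != v) = false := by
      simp only [List.any_eq_false]
      intro v hv; simp [hall v hv]
    simp [h1, h2]
  · rw [not_forall] at hall
    simp only [not_forall, exists_prop] at hall
    obtain ⟨v, hv, hva⟩ := hall
    have hmem_v : v ∈ PySem.Set.ofList (a :: l) := by
      rw [PySem.Set.mem_ofList]; exact List.mem_cons_of_mem _ hv
    have hmem_a : a ∈ PySem.Set.ofList (a :: l) := by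
      rw [PySem.Set.mem_ofList]; exact List.mem_cons_self
    have hlen : 1 < (PySem.Set.ofList (a :: l)).length := by
      rcases hs : PySem.Set.ofList (a :: l) with _ | ⟨x, _ | ⟨y, t⟩⟩
      · rw [hs] at hmem_a; simp at hmem_a
      · rw [hs] at hmem_a hmem_v
        simp at hmem_a hmem_v
        exact absurd (hmem_v.trans hmem_a.symm) hva
      · simp
    have h2 : l.any (fun v => a != v) = true := by
      refine List.any_eq_true.2 ⟨v, hv, ?_⟩
      simp [bne_iff_ne]; exact fun he => hva he.symm
    simp [h2, hlen]

theorem validQuiz_eq (cards : List (String × String)) (h : (cards.map Prod.fst).Nodup) :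
    validQuiz cards = validQuiz_alt cards := by
  unfold validQuiz validQuiz_alt
  by_cases hlen : cards.length < 2
  · simp [hlen]
  · simp only [hlen, if_false]
    rcases cards with _ | ⟨⟨k, v⟩, rest⟩
    · simp at hlen
    · have hget : (PySem.List.pyGet? (((k, v) :: rest).map Prod.snd) 0).getD "" = v := by
        simp [PySem.List.pyGet?, PySem.List.pyIdx?]
      rw [hget, lookup_scan_eq_snd_scan _ h v]
      simp only [List.map_cons]
      have hL : (((k, v) :: rest).any fun p => v != p.2)
          = (rest.map Prod.snd).any (fun x => v != x) := by
        simp [List.any_cons, List.any_map, Function.comp_def, bne_self_eq_false]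
      rw [hL]
      exact (set_card_gt_one_iff v (rest.map Prod.snd)).symm

-- ===== VERDICT (by name: the statement is the Claim_ definition above) =====
theorem validQuiz_spec : Claim_equal_validQuiz := by
  intro cards _ hpre
  unfold Spec_validQuiz
  exact validQuiz_eq cards hpre
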